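-- pv_equiv track=rewrite | github.com/thanya-aura/thanyaaura-gateway | app/enterprise.py | _pick_highest
-- ===== SOURCE A (Python) =====
-- from typing import Optional, Dict, Any, Iterable, List
--
-- RANK = {
--     "Enterprise-Standard": 40,
--     "Enterprise-Professional": 50,
--     "Enterprise-Unlimited": 60,
-- }
--
-- def _pick_highest(plans: Iterable[str]) -> Optional[str]:
--     best = None
--     best_rank = -1
--     for p in plans:
--         r = RANK.get(p, -1)
--         if r > best_rank:
--             best, best_rank = p, r
--     return best
-- ===== SOURCE B (Python) =====
-- RANK = {
--     "Enterprise-Standard": 40,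
--     "Enterprise-Professional": 50,
--     "Enterprise-Unlimited": 60,
-- }
--
-- _PRIORITY = ["Enterprise-Unlimited", "Enterprise-Professional", "Enterprise-Standard"]
--
-- def _pick_highest(plans):
--     present = set(plans)
--     for name in _PRIORITY:
--         if name in present:
--             return name
--     return None
-- ===== Notes on version B (the rewrite author's own statement) =====
-- stated objective: idiomatic
-- what changed: Instead of scanning the input while tracking a running maximum rank, B builds a set of the given plans and scans the fixed priority table in descending rank order, returning the first plan present (the three ranks are distinct, so the result is identical, including None for empty or unknown-only inputs).
import Mathlib
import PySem

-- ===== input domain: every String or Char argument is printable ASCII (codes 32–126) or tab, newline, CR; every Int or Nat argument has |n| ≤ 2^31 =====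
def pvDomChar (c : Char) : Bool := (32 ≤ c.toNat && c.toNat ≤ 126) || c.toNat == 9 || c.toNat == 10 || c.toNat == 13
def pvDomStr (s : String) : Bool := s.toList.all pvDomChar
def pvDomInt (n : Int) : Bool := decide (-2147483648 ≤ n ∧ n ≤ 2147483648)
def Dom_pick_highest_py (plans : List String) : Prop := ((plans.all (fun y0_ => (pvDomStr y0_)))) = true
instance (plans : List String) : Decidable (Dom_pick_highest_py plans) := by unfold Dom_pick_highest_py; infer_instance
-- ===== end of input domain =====

-- B replaces A's running-maximum scan by a set of the plans probed in fixed descending-rank order (idiomatic; same cost).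


-- ===== PORT A =====
-- RANK = {"Enterprise-Standard": 40, "Enterprise-Professional": 50, "Enterprise-Unlimited": 60}
def RANK : PySem.Dict String Int :=
  PySem.Dict.ofList [("Enterprise-Standard", 40), ("Enterprise-Professional", 50), ("Enterprise-Unlimited", 60)]

-- best = None; best_rank = -1; for p in plans: r = RANK.get(p, -1); if r > best_rank: best, best_rank = p, r
def pick_highest_py (plans : List String) : Option String :=
  (plans.foldl (fun (st : Option String × Int) p =>
      let r := RANK.getD p (-1)
      if r > st.2 then (some p, r) else st)
    (none, -1)).1

-- ===== PORT B =====
-- _PRIORITY = ["Enterprise-Unlimited", "Enterprise-Professional", "Enterprise-Standard"]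
def PRIORITY : List String := ["Enterprise-Unlimited", "Enterprise-Professional", "Enterprise-Standard"]

-- present = set(plans); for name in _PRIORITY: if name in present: return name;  return None
def pick_highest_py_alt (plans : List String) : Option String :=
  let present : PySem.Set String := PySem.Set.ofList plans
  PRIORITY.find? (fun name => PySem.Set.contains present name)

-- ===== PRECONDITION & SPEC =====
def Spec_pick_highest_py (plans : List String) (out : Option String) : Prop := out = pick_highest_py_alt plans
instance (plans : List String) (out : Option String) : Decidable (Spec_pick_highest_py plans out) := by unfold Spec_pick_highest_py; infer_instance

-- ===== CLAIM (what is proved, stated in full; the proofs are below) =====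
def Claim_equal_pick_highest_py : Prop := ∀ (plans : List String), Dom_pick_highest_py plans → Spec_pick_highest_py plans (pick_highest_py plans)

-- ===== LEMMAS AND PROOFS =====

-- A's loop body, named for the proofs
def stepA (st : Option String × Int) (p : String) : Option String × Int :=
  let r := RANK.getD p (-1)
  if r > st.2 then (some p, r) else st

-- the four states A's accumulator can ever be in
def okState (st : Option String × Int) : Prop :=
  st = (none, -1) ∨ st = (some "Enterprise-Standard", 40) ∨
  st = (some "Enterprise-Professional", 50) ∨ st = (some "Enterprise-Unlimited", 60)

lemma rank_other (p : String) (h1 : p ≠ "Enterprise-Standard")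
    (h2 : p ≠ "Enterprise-Professional") (h3 : p ≠ "Enterprise-Unlimited") :
    RANK.getD p (-1) = -1 := by
  have e1 : ("Enterprise-Standard" == p) = false := by simp [Ne.symm h1]
  have e2 : ("Enterprise-Professional" == p) = false := by simp [Ne.symm h2]
  have e3 : ("Enterprise-Unlimited" == p) = false := by simp [Ne.symm h3]
  simp [RANK, PySem.Dict.getD, PySem.Dict.get?, PySem.Dict.ofList, PySem.Dict.update,
    PySem.Dict.insert, PySem.Dict.empty, PySem.Dict.contains, List.find?, e1, e2, e3]

-- characterisation of A's fold from any reachable state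
lemma foldA_char (plans : List String) (st : Option String × Int) (h : okState st) :
    (plans.foldl stepA st).1 =
      if st.2 = 60 then st.1
      else if "Enterprise-Unlimited" ∈ plans then some "Enterprise-Unlimited"
      else if st.2 = 50 then st.1
      else if "Enterprise-Professional" ∈ plans then some "Enterprise-Professional"
      else if st.2 = 40 then st.1
      else if "Enterprise-Standard" ∈ plans then some "Enterprise-Standard"
      else st.1 := by
  induction plans generalizing st with
  | nil => simp
  | cons p rest ih =>
    rw [List.foldl_cons]
    by_cases hU : p = "Enterprise-Unlimited"
    · subst hU
      rcases h with h | h | h | h <;> subst h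
      · have hst : stepA (none, -1) "Enterprise-Unlimited" = (some "Enterprise-Unlimited", 60) := by decide
        rw [hst, ih _ (by simp [okState])]; simp [List.mem_cons]
      · have hst : stepA (some "Enterprise-Standard", 40) "Enterprise-Unlimited" = (some "Enterprise-Unlimited", 60) := by decide
        rw [hst, ih _ (by simp [okState])]; simp [List.mem_cons]
      · have hst : stepA (some "Enterprise-Professional", 50) "Enterprise-Unlimited" = (some "Enterprise-Unlimited", 60) := by decide
        rw [hst, ih _ (by simp [okState])]; simp [List.mem_cons]
      · have hst : stepA (some "Enterprise-Unlimited", 60) "Enterprise-Unlimited" = (some "Enterprise-Unlimited", 60) := by decide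
        rw [hst, ih _ (by simp [okState])]; simp
    · by_cases hP : p = "Enterprise-Professional"
      · subst hP
        rcases h with h | h | h | h <;> subst h
        · have hst : stepA (none, -1) "Enterprise-Professional" = (some "Enterprise-Professional", 50) := by decide
          rw [hst, ih _ (by simp [okState])]; simp [List.mem_cons]
        · have hst : stepA (some "Enterprise-Standard", 40) "Enterprise-Professional" = (some "Enterprise-Professional", 50) := by decide
          rw [hst, ih _ (by simp [okState])]; simp [List.mem_cons]
        · have hst : stepA (some "Enterprise-Professional", 50) "Enterprise-Professional" = (some "Enterprise-Professional", 50) := by decide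
          rw [hst, ih _ (by simp [okState])]; simp [List.mem_cons]
        · have hst : stepA (some "Enterprise-Unlimited", 60) "Enterprise-Professional" = (some "Enterprise-Unlimited", 60) := by decide
          rw [hst, ih _ (by simp [okState])]; simp
      · by_cases hS : p = "Enterprise-Standard"
        · subst hS
          rcases h with h | h | h | h <;> subst h
          · have hst : stepA (none, -1) "Enterprise-Standard" = (some "Enterprise-Standard", 40) := by decide
            rw [hst, ih _ (by simp [okState])]; simp [List.mem_cons]
          · have hst : stepA (some "Enterprise-Standard", 40) "Enterprise-Standard" = (some "Enterprise-Standard", 40) := by decide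
            rw [hst, ih _ (by simp [okState])]; simp [List.mem_cons]
          · have hst : stepA (some "Enterprise-Professional", 50) "Enterprise-Standard" = (some "Enterprise-Professional", 50) := by decide
            rw [hst, ih _ (by simp [okState])]; simp [List.mem_cons]
          · have hst : stepA (some "Enterprise-Unlimited", 60) "Enterprise-Standard" = (some "Enterprise-Unlimited", 60) := by decide
            rw [hst, ih _ (by simp [okState])]; simp
        · have hr := rank_other p hS hP hU
          have hst : stepA st p = st := by
            rcases h with h | h | h | h <;> subst h <;> simp [stepA, hr]
          rw [hst, ih _ h]
          simp [List.mem_cons, Ne.symm hU, Ne.symm hP, Ne.symm hS]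

-- characterisation of B
lemma alt_char (plans : List String) :
    pick_highest_py_alt plans =
      if "Enterprise-Unlimited" ∈ plans then some "Enterprise-Unlimited"
      else if "Enterprise-Professional" ∈ plans then some "Enterprise-Professional"
      else if "Enterprise-Standard" ∈ plans then some "Enterprise-Standard"
      else none := by
  simp [pick_highest_py_alt, PRIORITY, List.find?, PySem.Set.contains_eq_listContains,
    List.contains_eq_mem, PySem.Set.mem_ofList]
  split_ifs <;> simp_all

-- ===== VERDICT (by name: the statement is the Claim_ definition above) =====
theorem pick_highest_py_spec : Claim_equal_pick_highest_py := by
  intro plans _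
  unfold Spec_pick_highest_py
  have hA : pick_highest_py plans = (plans.foldl stepA (none, -1)).1 := rfl
  rw [hA, foldA_char plans (none, -1) (Or.inl rfl), alt_char]
  norm_num
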